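-- pv_equiv track=rewrite | github.com/joaovicdev/nemesis | scripts/update_kali_manifest.py | pick_phase
-- ===== SOURCE A (Python) =====
-- MENU_TO_PHASE: dict[str, str] = {
--     "kali-linux-headless": "scanning",
--     "kali-tools-information-gathering": "recon",
--     "kali-tools-vulnerability": "vulnerability",
--     "kali-tools-web": "enumeration",
--     "kali-tools-database": "enumeration",
--     "kali-tools-passwords": "exploitation",
--     "kali-tools-wireless": "exploitation",
--     "kali-tools-reverse-engineering": "exploitation",
--     "kali-tools-exploitation": "exploitation",
--     "kali-tools-social-engineering": "exploitation",
--     "kali-tools-sniffing-spoofing": "enumeration",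
--     "kali-tools-post-exploitation": "exploitation",
--     "kali-tools-forensics": "forensics",
--     "kali-tools-reporting": "recon",
--     "kali-tools-identify": "recon",
--     "kali-tools-protect": "vulnerability",
--     "kali-tools-detect": "vulnerability",
--     "kali-tools-respond": "exploitation",
--     "kali-tools-recover": "forensics",
--     "kali-tools-802-11": "exploitation",
--     "kali-tools-bluetooth": "exploitation",
--     "kali-tools-crypto-stego": "forensics",
--     "kali-tools-fuzzing": "enumeration",
--     "kali-tools-gpu": "exploitation",
--     "kali-tools-hardware": "enumeration",
--     "kali-tools-rfid": "enumeration",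
--     "kali-tools-sdr": "enumeration",
--     "kali-tools-voip": "enumeration",
--     "kali-tools-windows-resources": "exploitation",
--     "kali-tools-top10": "enumeration",
-- }
--
-- PHASE_RANK: dict[str, int] = {
--     "recon": 1,
--     "forensics": 2,
--     "scanning": 3,
--     "enumeration": 4,
--     "vulnerability": 5,
--     "exploitation": 6,
-- }
--
-- def pick_phase(sources: set[str]) -> str:
--     best = "recon"
--     best_rank = 0
--     for src in sources:
--         ph = MENU_TO_PHASE.get(src, "recon")
--         r = PHASE_RANK.get(ph, 0)
--         if r > best_rank:
--             best_rank = r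
--             best = ph
--     return best
-- ===== SOURCE B (Python) =====
-- # B: instead of A's dict lookup + running-max scan, keep an inverted index
-- # (phase -> its source menus, listed in descending phase rank) and return the
-- # first phase whose group intersects the given sources; "recon" is the default
-- # (covers empty input, unknown sources, and recon-mapped sources).
-- PHASE_SOURCES: list[tuple[str, frozenset[str]]] = [
--     ("exploitation", frozenset({
--         "kali-tools-passwords", "kali-tools-wireless",
--         "kali-tools-reverse-engineering", "kali-tools-exploitation",
--         "kali-tools-social-engineering", "kali-tools-post-exploitation",
--         "kali-tools-respond", "kali-tools-802-11", "kali-tools-bluetooth",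
--         "kali-tools-gpu", "kali-tools-windows-resources"})),
--     ("vulnerability", frozenset({
--         "kali-tools-vulnerability", "kali-tools-protect", "kali-tools-detect"})),
--     ("enumeration", frozenset({
--         "kali-tools-web", "kali-tools-database", "kali-tools-sniffing-spoofing",
--         "kali-tools-fuzzing", "kali-tools-hardware", "kali-tools-rfid",
--         "kali-tools-sdr", "kali-tools-voip", "kali-tools-top10"})),
--     ("scanning", frozenset({"kali-linux-headless"})),
--     ("forensics", frozenset({
--         "kali-tools-forensics", "kali-tools-recover", "kali-tools-crypto-stego"})),
-- ]
--
--
-- def pick_phase(sources: set[str]) -> str: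
--     for ph, grp in PHASE_SOURCES:
--         if not grp.isdisjoint(sources):
--             return ph
--     return "recon"
-- ===== Notes on version B (the rewrite author's own statement) =====
-- stated objective: alternative
-- what changed: B replaces A's MENU_TO_PHASE lookup plus running (best, best_rank) maximum with an inverted index from phase to its source menus, scanned in descending rank order: the first phase whose group intersects the sources wins, with 'recon' as the default.
import Mathlib
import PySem

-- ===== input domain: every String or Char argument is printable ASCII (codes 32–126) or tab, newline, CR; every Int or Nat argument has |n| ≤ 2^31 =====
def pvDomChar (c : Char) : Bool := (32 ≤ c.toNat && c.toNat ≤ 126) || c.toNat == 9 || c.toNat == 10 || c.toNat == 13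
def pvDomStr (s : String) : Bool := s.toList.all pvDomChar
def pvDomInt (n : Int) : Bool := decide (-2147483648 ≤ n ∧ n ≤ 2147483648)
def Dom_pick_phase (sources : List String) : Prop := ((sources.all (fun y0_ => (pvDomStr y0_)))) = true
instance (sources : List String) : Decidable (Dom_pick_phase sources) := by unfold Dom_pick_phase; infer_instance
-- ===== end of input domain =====

-- B replaces A's dict lookup + running (best, best_rank) maximum with an inverted
-- index (phase -> its source menus, in descending rank order), returning the first
-- phase whose group intersects the sources; alternative decomposition, same cost.

-- ===== PORT A =====
def pvPairs : List (String × String) := [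
  ("kali-linux-headless", "scanning"),
  ("kali-tools-information-gathering", "recon"),
  ("kali-tools-vulnerability", "vulnerability"),
  ("kali-tools-web", "enumeration"),
  ("kali-tools-database", "enumeration"),
  ("kali-tools-passwords", "exploitation"),
  ("kali-tools-wireless", "exploitation"),
  ("kali-tools-reverse-engineering", "exploitation"),
  ("kali-tools-exploitation", "exploitation"),
  ("kali-tools-social-engineering", "exploitation"),
  ("kali-tools-sniffing-spoofing", "enumeration"),
  ("kali-tools-post-exploitation", "exploitation"),
  ("kali-tools-forensics", "forensics"),
  ("kali-tools-reporting", "recon"),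
  ("kali-tools-identify", "recon"),
  ("kali-tools-protect", "vulnerability"),
  ("kali-tools-detect", "vulnerability"),
  ("kali-tools-respond", "exploitation"),
  ("kali-tools-recover", "forensics"),
  ("kali-tools-802-11", "exploitation"),
  ("kali-tools-bluetooth", "exploitation"),
  ("kali-tools-crypto-stego", "forensics"),
  ("kali-tools-fuzzing", "enumeration"),
  ("kali-tools-gpu", "exploitation"),
  ("kali-tools-hardware", "enumeration"),
  ("kali-tools-rfid", "enumeration"),
  ("kali-tools-sdr", "enumeration"),
  ("kali-tools-voip", "enumeration"),
  ("kali-tools-windows-resources", "exploitation"),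
  ("kali-tools-top10", "enumeration")]

def pvMenuToPhase : PySem.Dict String String := PySem.Dict.mk pvPairs

def pvPhaseRank : PySem.Dict String Int := PySem.Dict.mk [
  ("recon", 1), ("forensics", 2), ("scanning", 3),
  ("enumeration", 4), ("vulnerability", 5), ("exploitation", 6)]

def pick_phase (sources : List String) : String :=
  (sources.foldl (fun acc src =>
      let ph := pvMenuToPhase.getD src "recon"
      let r := pvPhaseRank.getD ph 0
      if r > acc.2 then (ph, r) else acc)
    ("recon", (0 : Int))).1

-- ===== PORT B =====
def pvGrpExploitation : List String :=
  ["kali-tools-passwords", "kali-tools-wireless",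
   "kali-tools-reverse-engineering", "kali-tools-exploitation",
   "kali-tools-social-engineering", "kali-tools-post-exploitation",
   "kali-tools-respond", "kali-tools-802-11", "kali-tools-bluetooth",
   "kali-tools-gpu", "kali-tools-windows-resources"]
def pvGrpVulnerability : List String :=
  ["kali-tools-vulnerability", "kali-tools-protect", "kali-tools-detect"]
def pvGrpEnumeration : List String :=
  ["kali-tools-web", "kali-tools-database", "kali-tools-sniffing-spoofing",
   "kali-tools-fuzzing", "kali-tools-hardware", "kali-tools-rfid",
   "kali-tools-sdr", "kali-tools-voip", "kali-tools-top10"]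
def pvGrpScanning : List String := ["kali-linux-headless"]
def pvGrpForensics : List String :=
  ["kali-tools-forensics", "kali-tools-recover", "kali-tools-crypto-stego"]

def pvPhaseSources : List (String × List String) :=
  [("exploitation", pvGrpExploitation), ("vulnerability", pvGrpVulnerability),
   ("enumeration", pvGrpEnumeration), ("scanning", pvGrpScanning),
   ("forensics", pvGrpForensics)]

-- 'not grp.isdisjoint(sources)' = some source is in grp
def pvScanPhases : List (String × List String) → List String → String
  | [], _ => "recon"
  | (ph, grp) :: rest, sources =>
      if sources.any (fun s => grp.contains s) then ph
      else pvScanPhases rest sources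

def pick_phase_alt (sources : List String) : String :=
  pvScanPhases pvPhaseSources sources

-- ===== PRECONDITION & SPEC =====
def Spec_pick_phase (sources : List String) (out : String) : Prop := out = pick_phase_alt sources
instance (sources : List String) (out : String) : Decidable (Spec_pick_phase sources out) := by unfold Spec_pick_phase; infer_instance

-- ===== CLAIM (what is proved, stated in full; the proofs are below) =====
def Claim_equal_pick_phase : Prop := ∀ (sources : List String), Dom_pick_phase sources → Spec_pick_phase sources (pick_phase sources)

-- ===== LEMMAS AND PROOFS =====

-- the phase of a source and the rank of a phase, as A computes them
def phOf (s : String) : String := pvMenuToPhase.getD s "recon"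
def rkOf (ph : String) : Int := pvPhaseRank.getD ph 0

-- canonical phase name of each rank (0 and 1 both map to "recon")
def phName (r : Int) : String :=
  if r = 6 then "exploitation" else if r = 5 then "vulnerability"
  else if r = 4 then "enumeration" else if r = 3 then "scanning"
  else if r = 2 then "forensics" else "recon"

-- maximum rank among the sources' phases, starting from a
def maxR (l : List String) (a : Int) : Int :=
  l.foldl (fun m s => max m (rkOf (phOf s))) a

-- a dict lookup that hits returns a pair of the dict's list (keyed by the query)
lemma get?_pair_mem : ∀ (l : List (String × String)) (s v : String),
    (PySem.Dict.mk l).get? s = some v → (s, v) ∈ l := by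
  intro l
  induction l with
  | nil => intro s v h; simp [PySem.Dict.get?] at h
  | cons p rest ih =>
    intro s v h
    obtain ⟨k, w⟩ := p
    rw [PySem.Dict.get?_mk_cons] at h
    by_cases hc : (k == s) = true
    · rw [if_pos hc] at h
      simp only [Option.some.injEq] at h
      have hk : k = s := by simpa using hc
      simp [hk, h]
    · rw [if_neg hc] at h
      exact List.mem_cons_of_mem _ (ih s v h)

-- A's lookup either defaults to "recon" or the (source, phase) pair is in the table
lemma phOf_cases (s : String) : phOf s = "recon" ∨ (s, phOf s) ∈ pvPairs := by
  show pvMenuToPhase.getD s "recon" = "recon" ∨ _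
  rcases hopt : pvMenuToPhase.get? s with _ | v
  · left; rw [PySem.Dict.getD_eq_get?_getD, hopt]; rfl
  · right
    have : pvMenuToPhase.getD s "recon" = v := by
      rw [PySem.Dict.getD_eq_get?_getD, hopt]; rfl
    rw [show phOf s = v from this]
    exact get?_pair_mem pvPairs s v hopt

set_option maxHeartbeats 1000000 in
lemma phFacts (s : String) :
    phName (rkOf (phOf s)) = phOf s ∧ 1 ≤ rkOf (phOf s) ∧ rkOf (phOf s) ≤ 6 := by
  rcases phOf_cases s with h | h
  · rw [h]; exact ⟨by decide, by decide, by decide⟩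
  · simp only [pvPairs, List.mem_cons, List.not_mem_nil, or_false, Prod.mk.injEq] at h
    rcases h with ⟨_, h⟩|⟨_, h⟩|⟨_, h⟩|⟨_, h⟩|⟨_, h⟩|⟨_, h⟩|⟨_, h⟩|⟨_, h⟩|⟨_, h⟩|⟨_, h⟩|⟨_, h⟩|⟨_, h⟩|⟨_, h⟩|⟨_, h⟩|⟨_, h⟩|⟨_, h⟩|⟨_, h⟩|⟨_, h⟩|⟨_, h⟩|⟨_, h⟩|⟨_, h⟩|⟨_, h⟩|⟨_, h⟩|⟨_, h⟩|⟨_, h⟩|⟨_, h⟩|⟨_, h⟩|⟨_, h⟩|⟨_, h⟩|⟨_, h⟩ <;>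
      rw [h] <;> exact ⟨by decide, by decide, by decide⟩

-- A's fold computes the canonical name of the running maximum rank
lemma foldA_eq (l : List String) : ∀ (b : String) (r : Int), b = phName r →
    (l.foldl (fun acc src =>
        if rkOf (phOf src) > acc.2 then (phOf src, rkOf (phOf src)) else acc) (b, r)).1
      = phName (maxR l r) := by
  induction l with
  | nil => intro b r h; simpa [maxR] using h
  | cons s l ih =>
    intro b r h
    simp only [List.foldl_cons, maxR]
    by_cases hc : rkOf (phOf s) > r
    · rw [if_pos hc]
      have hmax : max r (rkOf (phOf s)) = rkOf (phOf s) := by omega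
      rw [hmax]
      exact ih (phOf s) (rkOf (phOf s)) (phFacts s).1.symm
    · rw [if_neg hc]
      have hmax : max r (rkOf (phOf s)) = r := by omega
      rw [hmax]
      exact ih b r h

lemma pick_phase_eq (sources : List String) : pick_phase sources = phName (maxR sources 0) :=
  foldA_eq sources "recon" 0 rfl

lemma zero_le_maxR : ∀ (l : List String) (a : Int), a ≤ maxR l a := by
  intro l
  induction l with
  | nil => intro a; simp [maxR]
  | cons s l ih =>
    intro a
    have := ih (max a (rkOf (phOf s)))
    simp only [maxR, List.foldl_cons] at *
    omega

lemma maxR_mem_le : ∀ (l : List String) (a : Int) (s : String), s ∈ l → rkOf (phOf s) ≤ maxR l a := by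
  intro l
  induction l with
  | nil => intro a s h; simp at h
  | cons t l ih =>
    intro a s h
    rcases List.mem_cons.mp h with h | h
    · subst h
      have := zero_le_maxR l (max a (rkOf (phOf s)))
      simp only [maxR, List.foldl_cons] at *
      omega
    · simpa [maxR] using ih (max a (rkOf (phOf t))) s h

lemma maxR_attained : ∀ (l : List String) (a : Int),
    maxR l a = a ∨ ∃ s ∈ l, rkOf (phOf s) = maxR l a := by
  intro l
  induction l with
  | nil => intro a; left; simp [maxR]
  | cons t l ih =>
    intro a
    rcases ih (max a (rkOf (phOf t))) with h | ⟨s, hs, he⟩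
    · by_cases hc : rkOf (phOf t) ≤ a
      · left; simp only [maxR, List.foldl_cons] at *; omega
      · right
        refine ⟨t, List.mem_cons_self .., ?_⟩
        simp only [maxR, List.foldl_cons] at *; omega
    · right; exact ⟨s, List.mem_cons_of_mem _ hs, by simpa [maxR] using he⟩

lemma maxR_le_six (l : List String) : maxR l 0 ≤ 6 := by
  rcases maxR_attained l 0 with h | ⟨s, _, he⟩
  · omega
  · have := (phFacts s).2.2; omega

lemma maxR_ne (l : List String) (k : Int) (h1 : 1 ≤ k)
    (hn : ¬ ∃ s ∈ l, rkOf (phOf s) = k) : maxR l 0 ≠ k := by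
  intro he
  rcases maxR_attained l 0 with h | ⟨s, hs, hr⟩
  · omega
  · exact hn ⟨s, hs, by omega⟩

-- membership in one of B's per-phase groups characterises that source's rank
set_option maxHeartbeats 1000000 in
lemma grp_iff (grp : List String) (k : Int)
    (hk : (grp, k) ∈ ([(pvGrpExploitation, 6), (pvGrpVulnerability, 5),
        (pvGrpEnumeration, 4), (pvGrpScanning, 3), (pvGrpForensics, 2)] :
        List (List String × Int))) (s : String) :
    grp.contains s = true ↔ rkOf (phOf s) = k := by
  constructor
  · intro h
    have hm : s ∈ grp := by simpa using h
    fin_cases hk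
    · simp only [pvGrpExploitation, List.mem_cons, List.not_mem_nil, or_false] at hm
      rcases hm with h|h|h|h|h|h|h|h|h|h|h <;> rw [h] <;> decide
    · simp only [pvGrpVulnerability, List.mem_cons, List.not_mem_nil, or_false] at hm
      rcases hm with h|h|h <;> rw [h] <;> decide
    · simp only [pvGrpEnumeration, List.mem_cons, List.not_mem_nil, or_false] at hm
      rcases hm with h|h|h|h|h|h|h|h|h <;> rw [h] <;> decide
    · simp only [pvGrpScanning, List.mem_cons, List.not_mem_nil, or_false] at hm
      rw [hm]; decide
    · simp only [pvGrpForensics, List.mem_cons, List.not_mem_nil, or_false] at hm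
      rcases hm with h|h|h <;> rw [h] <;> decide
  · intro h
    rcases phOf_cases s with h0 | hm
    · rw [h0] at h
      exfalso; fin_cases hk <;> revert h <;> decide
    · simp only [pvPairs, List.mem_cons, List.not_mem_nil, or_false, Prod.mk.injEq] at hm
      fin_cases hk <;>
        · rcases hm with ⟨h1, h2⟩|⟨h1, h2⟩|⟨h1, h2⟩|⟨h1, h2⟩|⟨h1, h2⟩|⟨h1, h2⟩|⟨h1, h2⟩|⟨h1, h2⟩|⟨h1, h2⟩|⟨h1, h2⟩|⟨h1, h2⟩|⟨h1, h2⟩|⟨h1, h2⟩|⟨h1, h2⟩|⟨h1, h2⟩|⟨h1, h2⟩|⟨h1, h2⟩|⟨h1, h2⟩|⟨h1, h2⟩|⟨h1, h2⟩|⟨h1, h2⟩|⟨h1, h2⟩|⟨h1, h2⟩|⟨h1, h2⟩|⟨h1, h2⟩|⟨h1, h2⟩|⟨h1, h2⟩|⟨h1, h2⟩|⟨h1, h2⟩|⟨h1, h2⟩ <;>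
            rw [h2] at h <;> first | (exfalso; revert h; decide) | (subst h1; decide)

-- 'some source hits the group' read as 'some source has rank k'
lemma any_iff (sources : List String) (grp : List String) (k : Int)
    (hk : (grp, k) ∈ ([(pvGrpExploitation, 6), (pvGrpVulnerability, 5),
        (pvGrpEnumeration, 4), (pvGrpScanning, 3), (pvGrpForensics, 2)] :
        List (List String × Int))) :
    (sources.any (fun s => grp.contains s)) = true ↔ ∃ s ∈ sources, rkOf (phOf s) = k := by
  rw [List.any_eq_true]
  exact ⟨fun ⟨s, hs, h⟩ => ⟨s, hs, (grp_iff grp k hk s).mp h⟩,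
         fun ⟨s, hs, h⟩ => ⟨s, hs, (grp_iff grp k hk s).mpr h⟩⟩

lemma pick_phase_alt_eq (sources : List String) :
    pick_phase_alt sources = phName (maxR sources 0) := by
  have h0 : 0 ≤ maxR sources 0 := zero_le_maxR sources 0
  have h6 : maxR sources 0 ≤ 6 := maxR_le_six sources
  have c6 := any_iff sources pvGrpExploitation 6 (by simp)
  have c5 := any_iff sources pvGrpVulnerability 5 (by simp)
  have c4 := any_iff sources pvGrpEnumeration 4 (by simp)
  have c3 := any_iff sources pvGrpScanning 3 (by simp)
  have c2 := any_iff sources pvGrpForensics 2 (by simp)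
  show pvScanPhases pvPhaseSources sources = _
  simp only [pvPhaseSources, pvScanPhases]
  split_ifs with g6 g5 g4 g3 g2
  · obtain ⟨s, hs, hr⟩ := c6.mp g6
    have hge := maxR_mem_le sources 0 s hs
    have hM : maxR sources 0 = 6 := by omega
    rw [hM]; decide
  · obtain ⟨s, hs, hr⟩ := c5.mp g5
    have hge := maxR_mem_le sources 0 s hs
    have hn6 := maxR_ne sources 6 (by decide) (fun hex => g6 (c6.mpr hex))
    have hM : maxR sources 0 = 5 := by omega
    rw [hM]; decide
  · obtain ⟨s, hs, hr⟩ := c4.mp g4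
    have hge := maxR_mem_le sources 0 s hs
    have hn6 := maxR_ne sources 6 (by decide) (fun hex => g6 (c6.mpr hex))
    have hn5 := maxR_ne sources 5 (by decide) (fun hex => g5 (c5.mpr hex))
    have hM : maxR sources 0 = 4 := by omega
    rw [hM]; decide
  · obtain ⟨s, hs, hr⟩ := c3.mp g3
    have hge := maxR_mem_le sources 0 s hs
    have hn6 := maxR_ne sources 6 (by decide) (fun hex => g6 (c6.mpr hex))
    have hn5 := maxR_ne sources 5 (by decide) (fun hex => g5 (c5.mpr hex))
    have hn4 := maxR_ne sources 4 (by decide) (fun hex => g4 (c4.mpr hex))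
    have hM : maxR sources 0 = 3 := by omega
    rw [hM]; decide
  · obtain ⟨s, hs, hr⟩ := c2.mp g2
    have hge := maxR_mem_le sources 0 s hs
    have hn6 := maxR_ne sources 6 (by decide) (fun hex => g6 (c6.mpr hex))
    have hn5 := maxR_ne sources 5 (by decide) (fun hex => g5 (c5.mpr hex))
    have hn4 := maxR_ne sources 4 (by decide) (fun hex => g4 (c4.mpr hex))
    have hn3 := maxR_ne sources 3 (by decide) (fun hex => g3 (c3.mpr hex))
    have hM : maxR sources 0 = 2 := by omega
    rw [hM]; decide
  · have hn6 := maxR_ne sources 6 (by decide) (fun hex => g6 (c6.mpr hex))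
    have hn5 := maxR_ne sources 5 (by decide) (fun hex => g5 (c5.mpr hex))
    have hn4 := maxR_ne sources 4 (by decide) (fun hex => g4 (c4.mpr hex))
    have hn3 := maxR_ne sources 3 (by decide) (fun hex => g3 (c3.mpr hex))
    have hn2 := maxR_ne sources 2 (by decide) (fun hex => g2 (c2.mpr hex))
    have hM : maxR sources 0 = 0 ∨ maxR sources 0 = 1 := by omega
    rcases hM with hM | hM <;> rw [hM] <;> decide

-- ===== VERDICT (by name: the statement is the Claim_ definition above) =====
theorem pick_phase_spec : Claim_equal_pick_phase := by
  intro sources _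
  unfold Spec_pick_phase
  rw [pick_phase_eq, pick_phase_alt_eq]
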